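-- pv_equiv track=rewrite | github.com/mrexodia/ida-pro-mcp | src/ida_pro_mcp/ida_mcp/fast_str.py | _literal_runs
-- ===== SOURCE A (Python) =====
-- def _literal_runs(pattern: str) -> list[str]:
--     runs: list[str] = []
--     current = ""
--     escape = False
--     for ch in pattern:
--         if escape:
--             current += ch
--             escape = False
--             continue
--         if ch == "\\":
--             escape = True
--             continue
--         if ch in ".^$*+?{}[]|()":
--             if current:
--                 runs.append(current)
--                 current = ""
--             continue
--         current += ch
--     if current:
--         runs.append(current)
--     return runs
-- ===== SOURCE B (Python) =====
-- def _literal_runs(pattern: str) -> list[str]: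
--     meta = ".^$*+?{}[]|()"
--     # pass 1: tokenize into literal chars and break sentinels (None)
--     tokens = []
--     i, n = 0, len(pattern)
--     while i < n:
--         ch = pattern[i]
--         if ch == "\\":
--             if i + 1 < n:
--                 tokens.append(pattern[i + 1])
--             i += 2
--         elif ch in meta:
--             tokens.append(None)
--             i += 1
--         else:
--             tokens.append(ch)
--             i += 1
--     # pass 2: split the token stream on sentinels and join the groups
--     runs = []
--     group = []
--     for t in tokens + [None]:
--         if t is None:
--             if group:
--                 runs.append("".join(group))
--                 group = []
--         else:
--             group.append(t)
--     return runs
-- ===== Notes on version B (the rewrite author's own statement) =====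
-- stated objective: alternative
-- what changed: Replaced A's single-pass accumulate/flush state machine (escape flag + current-run buffer) with a two-pass pipeline: first tokenize the pattern into literal characters and break sentinels, then split the token stream on sentinels and join the groups.
import Mathlib
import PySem

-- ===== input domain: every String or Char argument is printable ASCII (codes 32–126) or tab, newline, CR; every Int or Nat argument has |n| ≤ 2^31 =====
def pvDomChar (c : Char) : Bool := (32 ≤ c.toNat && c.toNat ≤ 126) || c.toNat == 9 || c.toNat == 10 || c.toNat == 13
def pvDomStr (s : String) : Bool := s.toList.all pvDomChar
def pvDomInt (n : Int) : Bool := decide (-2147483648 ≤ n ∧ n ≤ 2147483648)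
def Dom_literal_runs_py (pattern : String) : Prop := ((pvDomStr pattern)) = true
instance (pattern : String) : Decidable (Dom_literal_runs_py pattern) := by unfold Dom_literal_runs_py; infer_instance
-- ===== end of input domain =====

-- B replaces A's accumulate/flush state machine with a tokenize-then-group two-pass pipeline (alternative decomposition, same cost).

-- the metacharacter set ".^$*+?{}[]|()"
def pvMeta : List Char := ['.', '^', '$', '*', '+', '?', '{', '}', '[', ']', '|', '(', ')']

-- ===== PORT A =====
-- A's loop state: (runs, current run as chars, escape flag); `current += ch` is `++ [ch]`
def lrStepA (st : List String × List Char × Bool) (ch : Char) : List String × List Char × Bool :=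
  if st.2.2 then (st.1, st.2.1 ++ [ch], false)
  else if ch = '\\' then (st.1, st.2.1, true)
  else if pvMeta.contains ch then
    (if st.2.1 ≠ [] then (st.1 ++ [String.mk st.2.1], [], false) else (st.1, st.2.1, false))
  else (st.1, st.2.1 ++ [ch], false)

def literal_runs_py (pattern : String) : List String :=
  let st := pattern.toList.foldl lrStepA ([], [], false)
  if st.2.1 ≠ [] then st.1 ++ [String.mk st.2.1] else st.1

-- ===== PORT B =====
-- pass 1: tokens — `some c` is a literal character, `none` a break sentinel
def lrTokenize : List Char → List (Option Char)
  | [] => []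
  | c :: rest =>
    if c = '\\' then
      match rest with
      | [] => []
      | d :: rest' => some d :: lrTokenize rest'
    else (if pvMeta.contains c then none else some c) :: lrTokenize rest

-- pass 2 step: state (runs, group); a sentinel flushes a non-empty group
def lrGStep (st : List String × List Char) (t : Option Char) : List String × List Char :=
  match t with
  | none => if st.2 ≠ [] then (st.1 ++ [String.mk st.2], []) else (st.1, [])
  | some c => (st.1, st.2 ++ [c])

def literal_runs_py_alt (pattern : String) : List String :=
  let tokens := lrTokenize pattern.toList
  ((tokens ++ [none]).foldl lrGStep ([], [])).1

-- ===== PRECONDITION & SPEC =====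
def Spec_literal_runs_py (pattern : String) (out : List String) : Prop := out = literal_runs_py_alt pattern
instance (pattern : String) (out : List String) : Decidable (Spec_literal_runs_py pattern out) := by unfold Spec_literal_runs_py; infer_instance

-- ===== CLAIM (what is proved, stated in full; the proofs are below) =====
def Claim_equal_literal_runs_py : Prop := ∀ (pattern : String), Dom_literal_runs_py pattern → Spec_literal_runs_py pattern (literal_runs_py pattern)

-- ===== LEMMAS AND PROOFS =====

-- proof-only helpers and step lemmas
def lrFinish (st : List String × List Char × Bool) : List String :=
  if st.2.1 ≠ [] then st.1 ++ [String.mk st.2.1] else st.1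

theorem stepA_esc (rs : List String) (cur : List Char) (ch : Char) :
    lrStepA (rs, cur, true) ch = (rs, cur ++ [ch], false) := by simp [lrStepA]

theorem stepA_bs (rs : List String) (cur : List Char) :
    lrStepA (rs, cur, false) '\\' = (rs, cur, true) := by simp [lrStepA]

theorem stepA_meta (rs : List String) (cur : List Char) (ch : Char) (h1 : ch ≠ '\\')
    (h2 : pvMeta.contains ch = true) :
    lrStepA (rs, cur, false) ch
      = (if cur ≠ [] then (rs ++ [String.mk cur], [], false) else (rs, cur, false)) := by
  have h2' : ch ∈ pvMeta := by simpa using h2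
  simp [lrStepA, h1, h2']

theorem stepA_lit (rs : List String) (cur : List Char) (ch : Char) (h1 : ch ≠ '\\')
    (h2 : ¬ pvMeta.contains ch = true) :
    lrStepA (rs, cur, false) ch = (rs, cur ++ [ch], false) := by
  have h2' : ch ∉ pvMeta := by simpa using h2
  simp [lrStepA, h1, h2']

-- reference grouping: runs produced from pending group `cur` and tokens (with the final flush built in)
def lrGrp : List Char → List (Option Char) → List String
  | cur, [] => if cur ≠ [] then [String.mk cur] else []
  | cur, some c :: ts => lrGrp (cur ++ [c]) ts
  | cur, none :: ts => (if cur ≠ [] then [String.mk cur] else []) ++ lrGrp [] ts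

theorem lrGStep_fold_eq (toks : List (Option Char)) : ∀ (rs : List String) (cur : List Char),
    ((toks ++ [none]).foldl lrGStep (rs, cur)).1 = rs ++ lrGrp cur toks := by
  induction toks with
  | nil =>
    intro rs cur
    simp only [List.nil_append, List.foldl_cons, List.foldl_nil, lrGStep, lrGrp]
    split_ifs <;> simp
  | cons t ts ih =>
    intro rs cur
    rw [List.cons_append, List.foldl_cons]
    cases t with
    | some c =>
      show ((ts ++ [none]).foldl lrGStep (rs, cur ++ [c])).1 = rs ++ lrGrp cur (some c :: ts)
      rw [ih, lrGrp]
    | none =>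
      show ((ts ++ [none]).foldl lrGStep
        (if cur ≠ [] then (rs ++ [String.mk cur], []) else (rs, []))).1 = rs ++ lrGrp cur (none :: ts)
      rw [lrGrp]
      split_ifs with h
      · rw [ih]; simp
      · rw [ih]; simp

theorem lrStepA_fold_eq (l : List Char) : ∀ (rs : List String) (cur : List Char),
    lrFinish (l.foldl lrStepA (rs, cur, false)) = rs ++ lrGrp cur (lrTokenize l) := by
  induction l using lrTokenize.induct with
  | case1 =>
    intro rs cur
    simp only [List.foldl_nil, lrTokenize, lrGrp, lrFinish]
    split_ifs <;> simp
  | case2 =>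
    intro rs cur
    rw [List.foldl_cons, stepA_bs, List.foldl_nil,
        show lrTokenize ['\\'] = [] from rfl, lrGrp, lrFinish]
    split_ifs <;> simp
  | case3 c rest' ih =>
    intro rs cur
    rw [List.foldl_cons, stepA_bs, List.foldl_cons, stepA_esc,
        show lrTokenize ('\\' :: c :: rest') = some c :: lrTokenize rest' from rfl, lrGrp]
    exact ih rs (cur ++ [c])
  | case4 c rest hne ih =>
    intro rs cur
    have hne' : ¬(c = '\\') := hne
    have ht : lrTokenize (c :: rest)
        = (if pvMeta.contains c then none else some c) :: lrTokenize rest := by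
      rw [lrTokenize.eq_def]
      simp [hne']
    by_cases hm : pvMeta.contains c = true
    · rw [List.foldl_cons, stepA_meta rs cur c hne' hm, ht, if_pos hm, lrGrp]
      split_ifs with h
      · rw [ih (rs ++ [String.mk cur]) []]
        simp
      · have hc : cur = [] := not_not.mp h
        subst hc
        rw [ih rs []]
        simp
    · rw [List.foldl_cons, stepA_lit rs cur c hne' hm, ht, if_neg hm, lrGrp]
      exact ih rs (cur ++ [c])

-- ===== VERDICT (by name: the statement is the Claim_ definition above) =====
theorem literal_runs_py_spec : Claim_equal_literal_runs_py := by
  intro pattern _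
  show literal_runs_py pattern = literal_runs_py_alt pattern
  have hA : literal_runs_py pattern
      = lrFinish (pattern.toList.foldl lrStepA ([], [], false)) := rfl
  have hB : literal_runs_py_alt pattern
      = ((lrTokenize pattern.toList ++ [none]).foldl lrGStep ([], [])).1 := rfl
  rw [hA, hB, lrStepA_fold_eq, lrGStep_fold_eq]
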